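-- pv_equiv track=rewrite | github.com/delmic/odemis | plugins/spectrum_arbscor.py | scan_order_checkerboard
-- ===== SOURCE A (Python) =====
-- from typing import Tuple, List
--
-- def scan_order_checkerboard(rep: Tuple[int, int]) -> List[Tuple[int, int]]:
--     """
--     Checkerboard
--     First scan every odd pixel, and then every even pixel. Like first scanning the white
--     squares of a checkerboard, and then the black squares.
--     Example:
--     192.3.4.
--     .5.6.7.8
--     See _get_scan_order() for the parameter documentation
--     """
--     order = []
--     # Add odd pixels
--     for j in range(rep[1]):  # Y slow
--         for i in range(rep[0]):  # X fast
--             if (i + j) % 2 == 0: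
--                 order.append((i, j))
--
--     # Add even pixels
--     for j in range(rep[1]):
--         for i in range(rep[0]):
--             if (i + j) % 2 == 1:
--                 order.append((i, j))
--
--     return order
-- ===== SOURCE B (Python) =====
-- from typing import Tuple, List
--
-- def scan_order_checkerboard(rep: Tuple[int, int]) -> List[Tuple[int, int]]:
--     """Single pass over the grid: bucket each pixel by parity, then
--     concatenate the white bucket before the black one."""
--     white: List[Tuple[int, int]] = []
--     black: List[Tuple[int, int]] = []
--     for j in range(rep[1]):
--         for i in range(rep[0]):
--             if (i + j) % 2 == 0:
--                 white.append((i, j))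
--             else:
--                 black.append((i, j))
--     return white + black
-- ===== Notes on version B (the rewrite author's own statement) =====
-- stated objective: alternative
-- what changed: Replaces A's two full nested scans of the grid (one per parity) by a single nested scan that buckets pixels into separate white/black lists and concatenates white before black.
import Mathlib
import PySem

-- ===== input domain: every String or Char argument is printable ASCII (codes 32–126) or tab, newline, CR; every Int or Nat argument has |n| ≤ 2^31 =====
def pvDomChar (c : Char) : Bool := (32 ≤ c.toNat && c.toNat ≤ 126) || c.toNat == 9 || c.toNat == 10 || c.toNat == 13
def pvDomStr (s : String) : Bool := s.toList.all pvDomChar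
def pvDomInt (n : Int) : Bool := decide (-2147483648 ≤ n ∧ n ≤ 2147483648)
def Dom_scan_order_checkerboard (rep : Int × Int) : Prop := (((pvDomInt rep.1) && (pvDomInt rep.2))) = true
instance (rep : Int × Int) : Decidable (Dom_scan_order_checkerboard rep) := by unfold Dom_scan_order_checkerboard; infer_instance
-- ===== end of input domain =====

-- B makes ONE nested scan of the grid, bucketing pixels into white/black lists, instead of A's two separate per-parity scans.

-- ===== PORT A =====
def scan_order_checkerboard (rep : Int × Int) : List (Int × Int) :=
  -- order = []; two nested-loop passes, appending by parity
  let order : List (Int × Int) := []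
  let order := (PySem.List.pyRange 0 rep.2 1).foldl (fun ord j =>
    (PySem.List.pyRange 0 rep.1 1).foldl (fun ord i =>
      if PySem.Int.mod (i + j) 2 = 0 then ord ++ [(i, j)] else ord) ord) order
  let order := (PySem.List.pyRange 0 rep.2 1).foldl (fun ord j =>
    (PySem.List.pyRange 0 rep.1 1).foldl (fun ord i =>
      if PySem.Int.mod (i + j) 2 = 1 then ord ++ [(i, j)] else ord) ord) order
  order

-- ===== PORT B =====
def scan_order_checkerboard_alt (rep : Int × Int) : List (Int × Int) :=
  -- one nested scan maintaining the pair (white, black); return white ++ black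
  let wb : List (Int × Int) × List (Int × Int) :=
    (PySem.List.pyRange 0 rep.2 1).foldl (fun wb j =>
      (PySem.List.pyRange 0 rep.1 1).foldl (fun (wb : List (Int × Int) × List (Int × Int)) i =>
        if PySem.Int.mod (i + j) 2 = 0 then (wb.1 ++ [(i, j)], wb.2)
        else (wb.1, wb.2 ++ [(i, j)])) wb) ([], [])
  wb.1 ++ wb.2

-- ===== PRECONDITION & SPEC =====
def Spec_scan_order_checkerboard (rep : Int × Int) (out : List (Int × Int)) : Prop := out = scan_order_checkerboard_alt rep
instance (rep : Int × Int) (out : List (Int × Int)) : Decidable (Spec_scan_order_checkerboard rep out) := by unfold Spec_scan_order_checkerboard; infer_instance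

-- ===== CLAIM (what is proved, stated in full; the proofs are below) =====
def Claim_equal_scan_order_checkerboard : Prop := ∀ (rep : Int × Int), Dom_scan_order_checkerboard rep → Spec_scan_order_checkerboard rep (scan_order_checkerboard rep)

-- ===== LEMMAS AND PROOFS =====

-- closed form of one row of A's pass with parity p
def rowF (is : List Int) (j p : Int) : List (Int × Int) :=
  (is.filter (fun i => decide (PySem.Int.mod (i + j) 2 = p))).map (fun i => (i, j))

lemma aInner (is : List Int) (j p : Int) (acc : List (Int × Int)) :
    is.foldl (fun ord i => if PySem.Int.mod (i + j) 2 = p then ord ++ [(i, j)] else ord) acc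
      = acc ++ rowF is j p := by
  simpa [rowF] using
    PySem.List.foldl_append_ite (p := fun i => PySem.Int.mod (i + j) 2 = p)
      (f := fun i => (i, j)) (l := is) (acc := acc)

lemma aOuter (js is : List Int) (p : Int) (acc : List (Int × Int)) :
    js.foldl (fun ord j =>
      is.foldl (fun ord i => if PySem.Int.mod (i + j) 2 = p then ord ++ [(i, j)] else ord) ord) acc
      = acc ++ js.flatMap (fun j => rowF is j p) := by
  induction js generalizing acc with
  | nil => simp
  | cons j js ih =>
      simp only [List.foldl_cons, List.flatMap_cons]
      rw [aInner, ih, List.append_assoc]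

lemma bInner (is : List Int) (j : Int) (wb : List (Int × Int) × List (Int × Int)) :
    is.foldl (fun (wb : List (Int × Int) × List (Int × Int)) i =>
        if PySem.Int.mod (i + j) 2 = 0 then (wb.1 ++ [(i, j)], wb.2)
        else (wb.1, wb.2 ++ [(i, j)])) wb
      = (wb.1 ++ rowF is j 0, wb.2 ++ rowF is j 1) := by
  induction is generalizing wb with
  | nil => simp [rowF]
  | cons i is ih =>
      rcases PySem.Int.mod_two_eq (i + j) with h | h
      · have hd : (2:Int) ∣ (i + j) := (PySem.Int.mod_eq_zero_iff_dvd _ _).mp h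
        have he : ¬ ((i + j) % 2 = 1) := by omega
        rw [List.foldl_cons, if_pos h, ih]
        simp [rowF, hd, he, List.append_assoc]
      · have he : (i + j) % 2 = 1 := by
          rw [← PySem.Int.mod_eq_emod_of_pos (by omega : (0:Int) < 2)]; exact h
        have hd : ¬ ((2:Int) ∣ (i + j)) := by omega
        rw [List.foldl_cons, if_neg (by omega), ih]
        simp [rowF, hd, he, List.append_assoc]

lemma bOuter (js is : List Int) (wb : List (Int × Int) × List (Int × Int)) :
    js.foldl (fun wb j =>
      is.foldl (fun (wb : List (Int × Int) × List (Int × Int)) i =>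
        if PySem.Int.mod (i + j) 2 = 0 then (wb.1 ++ [(i, j)], wb.2)
        else (wb.1, wb.2 ++ [(i, j)])) wb) wb
      = (wb.1 ++ js.flatMap (fun j => rowF is j 0), wb.2 ++ js.flatMap (fun j => rowF is j 1)) := by
  induction js generalizing wb with
  | nil => simp
  | cons j js ih =>
      simp only [List.foldl_cons, List.flatMap_cons]
      rw [bInner, ih]
      simp [List.append_assoc]

-- ===== VERDICT (by name: the statement is the Claim_ definition above) =====
theorem scan_order_checkerboard_spec : Claim_equal_scan_order_checkerboard := by
  intro rep _
  unfold Spec_scan_order_checkerboard scan_order_checkerboard scan_order_checkerboard_alt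
  simp only [aOuter, bOuter, List.nil_append]
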